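-- pv_equiv track=rewrite | github.com/lirsacc/py-gql | py_gql/_string_utils.py | index_to_loc
-- ===== SOURCE A (Python) =====
-- from typing import (
--     Callable,
--     Container,
--     Iterable,
--     Iterator,
--     List,
--     Sequence,
--     Tuple,
--     Union,
-- )
--
-- def index_to_loc(body: str, position: int) -> Tuple[int, int]:
--     r""" Get the (line number, column number) tuple from a zero-indexed offset.
--
--     Args:
--         body (str): Source string
--         position (int): 0-indexed position of the character
--
--     Returns:
--         Tuple[int, int]: (line number, column number)
--
--     Raises:
--         :py:class:`IndexError`: if ``position`` is out of bounds
--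
--     >>> index_to_loc("ab\ncd\ne", 0)
--     (1, 1)
--
--     >>> index_to_loc("ab\ncd\ne", 3)
--     (2, 1)
--
--     >>> index_to_loc("", 0)
--     (1, 1)
--
--     >>> index_to_loc("{", 1)
--     (1, 2)
--
--     >>> index_to_loc("", 42)
--     Traceback (most recent call last):
--         ...
--     IndexError: 42
--     """
--     if not body and not position:
--         return (1, 1)
--
--     if position > len(body) or position < 0:
--         raise IndexError(position)
--
--     lines, cols = 0, 0
--     for offset, char in enumerate(body):
--         if offset == position:
--             return (lines + 1, cols + 1)
--         elif char == "\n":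
--             lines += 1
--             cols = 0
--         else:
--             cols += 1
--     return (lines + 1, cols + 1)
-- ===== SOURCE B (Python) =====
-- def index_to_loc(body: str, position: int):
--     """Offset -> (line, column) via built-in count/rfind instead of a char loop."""
--     if position > len(body) or position < 0:
--         raise IndexError(position)
--     prefix = body[:position]
--     return (prefix.count("\n") + 1, position - prefix.rfind("\n"))
-- ===== Notes on version B (the rewrite author's own statement) =====
-- stated objective: idiomatic
-- what changed: Replaces the explicit enumerate loop with its lines/cols accumulators by the closed form over the prefix body[:position]: line = prefix.count('\n') + 1 and column = position - prefix.rfind('\n').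
import Mathlib
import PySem

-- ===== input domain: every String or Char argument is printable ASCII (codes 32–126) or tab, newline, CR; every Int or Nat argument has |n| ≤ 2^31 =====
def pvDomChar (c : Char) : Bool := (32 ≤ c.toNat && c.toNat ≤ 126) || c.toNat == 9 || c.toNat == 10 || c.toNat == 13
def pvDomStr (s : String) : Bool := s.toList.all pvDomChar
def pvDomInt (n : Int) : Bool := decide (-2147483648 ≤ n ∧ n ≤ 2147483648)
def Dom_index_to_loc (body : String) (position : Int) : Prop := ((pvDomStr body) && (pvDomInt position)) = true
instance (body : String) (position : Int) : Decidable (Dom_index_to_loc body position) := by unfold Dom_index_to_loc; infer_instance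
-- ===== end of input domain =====

-- B replaces A's explicit enumerate loop by count/rfind on the prefix body[:position] (idiomatic decomposition).

-- ===== PORT A =====
-- the 'for offset, char in enumerate(body)' loop with early return at offset == position
def indexToLocLoop (position : Int) : List Char → Int → Int → Int → Int × Int
  | [], _, lines, cols => (lines + 1, cols + 1)
  | c :: rest, offset, lines, cols =>
      if offset = position then (lines + 1, cols + 1)
      else if c = '\n' then indexToLocLoop position rest (offset + 1) (lines + 1) 0
      else indexToLocLoop position rest (offset + 1) lines (cols + 1)

def index_to_loc (body : String) (position : Int) : Int × Int :=
  if body.toList = [] ∧ position = 0 then (1, 1)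
  else if position > PySem.Str.len body ∨ position < 0 then (0, 0)  -- Python raises IndexError here; excluded by Pre_
  else indexToLocLoop position body.toList 0 0 0

-- ===== PORT B =====
def index_to_loc_alt (body : String) (position : Int) : Int × Int :=
  if position > PySem.Str.len body ∨ position < 0 then (0, 0)  -- Python raises IndexError here; excluded by Pre_
  else
    let pre := PySem.List.slice body.toList none (some position)  -- body[:position]
    ((PySem.Chars.count pre ['\n'] : Int) + 1, position - PySem.Chars.rfind pre ['\n'])

-- ===== PRECONDITION & SPEC =====
-- exactly the inputs on which the Python A returns; outside it both A and B raise IndexError(position)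
def Pre_index_to_loc (body : String) (position : Int) : Prop :=
  0 ≤ position ∧ position ≤ PySem.Str.len body
instance (body : String) (position : Int) : Decidable (Pre_index_to_loc body position) := by
  unfold Pre_index_to_loc; infer_instance
def pvWitness_index_to_loc : String × Int := ("ab\ncd", 3)

def Spec_index_to_loc (body : String) (position : Int) (out : Int × Int) : Prop := out = index_to_loc_alt body position
instance (body : String) (position : Int) (out : Int × Int) : Decidable (Spec_index_to_loc body position out) := by unfold Spec_index_to_loc; infer_instance

-- ===== CLAIM (what is proved, stated in full; the proofs are below) =====
def Claim_equal_index_to_loc : Prop := ∀ (body : String) (position : Int), Dom_index_to_loc body position → Pre_index_to_loc body position → Spec_index_to_loc body position (index_to_loc body position)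

-- ===== LEMMAS AND PROOFS =====

-- index of the last occurrence of x, -1 if absent (closed form for rfind of a single char)
def lastIdx (x : Char) : List Char → Int
  | [] => -1
  | c :: t => if lastIdx x t = -1 then (if c = x then 0 else -1) else lastIdx x t + 1

lemma lastIdx_ge (x : Char) (cs : List Char) : -1 ≤ lastIdx x cs := by
  induction cs with
  | nil => simp [lastIdx]
  | cons c t ih => simp only [lastIdx]; split_ifs <;> omega

lemma lastIdx_append_singleton (x c : Char) (u : List Char) :
    lastIdx x (u ++ [c]) = if c = x then (u.length : Int) else lastIdx x u := by
  induction u with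
  | nil => simp [lastIdx]
  | cons a t ih =>
      have ht := lastIdx_ge x t
      simp only [List.cons_append, lastIdx, ih, List.length_cons]
      split_ifs <;> simp_all

lemma count_go_char (x : Char) : ∀ (t : List Char) (fuel acc : Nat),
    t.length ≤ fuel → PySem.Chars.count.go [x] fuel t acc = acc + t.count x := by
  intro t
  induction t with
  | nil => intro fuel acc h; cases fuel <;> simp [PySem.Chars.count.go]
  | cons c t ih =>
      intro fuel acc h
      cases fuel with
      | zero => simp at h
      | succ f =>
          have heq : PySem.Chars.count.go [x] (f+1) (c :: t) acc
              = if x == c then PySem.Chars.count.go [x] f t (acc+1)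
                else PySem.Chars.count.go [x] f t acc := by
            simp [PySem.Chars.count.go, List.isPrefixOf]
          simp only [List.length_cons] at h
          rw [heq]
          by_cases hx : x = c
          · subst hx
            rw [if_pos (by simp), ih f (acc+1) (by omega)]
            simp [List.count_cons]; omega
          · have hb : (x == c) = false := by simpa using hx
            have hb2 : (c == x) = false := by simp; exact fun h => hx h.symm
            rw [if_neg (by simp [hb]), ih f acc (by omega)]
            simp [List.count_cons, hb2]

lemma count_char (x : Char) (cs : List Char) : PySem.Chars.count cs [x] = cs.count x := by
  simpa [PySem.Chars.count] using count_go_char x cs cs.length 0 le_rfl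

lemma rfind_go_char (x : Char) (s : List Char) :
    ∀ j, j ≤ s.length → PySem.Chars.rfind.go s [x] j = lastIdx x (s.take (j + 1)) := by
  intro j
  induction j with
  | zero =>
      intro _
      cases s with
      | nil => simp [PySem.Chars.rfind.go, List.isPrefixOf, lastIdx]
      | cons c t =>
          have heq : PySem.Chars.rfind.go (c :: t) [x] 0 = if x == c then 0 else -1 := by
            simp [PySem.Chars.rfind.go, List.isPrefixOf]
          rw [heq, show (c::t).take (0+1) = [c] by simp]
          by_cases hx : x = c
          · subst hx; simp [lastIdx]
          · have hb : (x == c) = false := by simpa using hx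
            have hc : ¬ c = x := fun h => hx h.symm
            simp [lastIdx, hb, hc]
  | succ j ih =>
      intro hj
      have heq : PySem.Chars.rfind.go s [x] (j+1)
          = if [x].isPrefixOf (s.drop (j+1)) then ((j:Int)+1) else PySem.Chars.rfind.go s [x] j := by
        simp [PySem.Chars.rfind.go]
      rw [heq]
      rcases Nat.lt_or_ge (j + 1) s.length with hlt | hge
      · have hdrop : s.drop (j + 1) = s[j + 1] :: s.drop (j + 2) := by
          rw [List.drop_eq_getElem_cons hlt]
        have htake : s.take (j + 2) = s.take (j + 1) ++ [s[j + 1]] := by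
          rw [List.take_add_one, List.getElem?_eq_getElem hlt]; rfl
        rw [hdrop, htake, lastIdx_append_singleton]
        have hlen : (s.take (j + 1)).length = j + 1 := by
          simp [List.length_take]; omega
        by_cases hx : x = s[j + 1]
        · simp [List.isPrefixOf, hx, hlen]
        · have hc : ¬ (s[j + 1] = x) := fun h => hx h.symm
          have hb : (x == s[j+1]) = false := by simpa using hx
          simp [List.isPrefixOf, hb, hc, ih (by omega)]
      · have hdrop : s.drop (j + 1) = [] := List.drop_eq_nil_of_le hge
        have htake : s.take (j + 2) = s.take (j + 1) := by
          rw [List.take_of_length_le (by omega), List.take_of_length_le (by omega)]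
        simp [hdrop, htake, ih (by omega)]

lemma rfind_char (x : Char) (s : List Char) : PySem.Chars.rfind s [x] = lastIdx x s := by
  have := rfind_go_char x s s.length le_rfl
  simpa [PySem.Chars.rfind, List.take_of_length_le (Nat.le_succ _)] using this

lemma loopA_eq (cs : List Char) : ∀ (q : Nat) (off lines cols : Int), q ≤ cs.length →
    indexToLocLoop (off + q) cs off lines cols =
      (lines + ((cs.take q).count '\n' : Int) + 1,
       if lastIdx '\n' (cs.take q) = -1 then cols + q + 1 else (q : Int) - lastIdx '\n' (cs.take q)) := by
  induction cs with
  | nil =>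
      intro q off lines cols hq
      simp only [List.length_nil, Nat.le_zero] at hq
      subst hq
      simp [indexToLocLoop, lastIdx]
  | cons c t ih =>
      intro q off lines cols hq
      cases q with
      | zero => simp [indexToLocLoop, lastIdx]
      | succ q =>
          have hne : off ≠ off + (↑(q + 1) : Int) := by push_cast; omega
          simp only [List.length_cons] at hq
          by_cases hc : c = '\n'
          · have hstep : indexToLocLoop (off + ↑(q + 1)) (c :: t) off lines cols
                = indexToLocLoop ((off + 1) + q) t (off + 1) (lines + 1) 0 := by
              simp only [indexToLocLoop, if_neg hne, if_pos hc]
              congr 1; push_cast; ring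
            rw [hstep, ih q (off + 1) (lines + 1) 0 (by omega)]
            have hlt := lastIdx_ge '\n' (t.take q)
            simp only [List.take_succ_cons, List.count_cons, hc, lastIdx]
            split_ifs <;> simp_all <;> push_cast <;> ring_nf <;> omega
          · have hstep : indexToLocLoop (off + ↑(q + 1)) (c :: t) off lines cols
                = indexToLocLoop ((off + 1) + q) t (off + 1) lines (cols + 1) := by
              simp only [indexToLocLoop, if_neg hne, if_neg hc]
              congr 1; push_cast; ring
            rw [hstep, ih q (off + 1) lines (cols + 1) (by omega)]
            have hlt := lastIdx_ge '\n' (t.take q)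
            have hcb : (c == '\n') = false := by simpa using hc
            simp only [List.take_succ_cons, List.count_cons, lastIdx, hcb]
            split_ifs <;> simp_all <;> push_cast <;> ring_nf <;> omega

-- ===== VERDICT (by name: the statement is the Claim_ definition above) =====
theorem index_to_loc_spec : Claim_equal_index_to_loc := by
  intro body position _ hpre
  obtain ⟨h0, hle⟩ := hpre
  unfold Spec_index_to_loc index_to_loc index_to_loc_alt
  have hlen : PySem.Str.len body = (body.toList.length : Int) := by
    simp [PySem.Str.len_eq]
  have hnr : ¬ (position > PySem.Str.len body ∨ position < 0) := by
    rw [hlen] at hle ⊢; omega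
  obtain ⟨p, rfl⟩ : ∃ p : Nat, position = (p : Int) := ⟨position.toNat, (Int.toNat_of_nonneg h0).symm⟩
  have hp : p ≤ body.toList.length := by rw [hlen] at hle; exact_mod_cast hle
  have hslice : PySem.List.slice body.toList none (some (p : Int)) = body.toList.take p :=
    PySem.List.slice_to_natCast ..
  rw [if_neg hnr, if_neg hnr]
  simp only [hslice, count_char, rfind_char]
  by_cases hb : body.toList = [] ∧ (p : Int) = 0
  · obtain ⟨hb1, hb2⟩ := hb
    have : p = 0 := by exact_mod_cast hb2
    subst this
    simp [hb1, lastIdx]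
  · rw [if_neg hb]
    have hmain := loopA_eq body.toList p 0 0 0 hp
    rw [show (0 : Int) + (p : Int) = (p : Int) by ring] at hmain
    rw [hmain]
    have hge := lastIdx_ge '\n' (body.toList.take p)
    split_ifs with h
    · simp [h]
    · norm_num
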